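-- pv_equiv track=rewrite | github.com/Johan-garcia/parcial1 | parcial Johan Garcia/1)AFD/AFD.py | reconocer_token
-- ===== SOURCE A (Python) =====
-- def es_digito(caracter):
--     return '0' <= caracter <= '9'
--
-- def reconocer_token(entrada):
--     estado = 0
--
--     for i, caracter in enumerate(entrada):
--         if estado == 0:
--             if caracter == '+':
--                 estado = 1
--             elif es_digito(caracter):
--                 estado = 3
--             else:
--                 return "Error: Símbolo no reconocido"
--
--         elif estado == 1:
--             if caracter == '+':
--                 estado = 2
--             else:
--                 return "Error: Símbolo no reconocido"
--
--         elif estado == 3: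
--             if es_digito(caracter):
--                 continue
--             elif caracter == '.':
--                 estado = 4
--             else:
--                 return "Error: Símbolo no reconocido"
--
--         elif estado == 4:
--             if es_digito(caracter):
--                 estado = 5
--             else:
--                 return "Error: Símbolo no reconocido"
--
--     # Verificación de estados finales para devolver los tokens correctos
--     if estado == 1:
--         return 'SUMA'
--     elif estado == 2:
--         return 'INCR'
--     elif estado == 3:
--         return 'ENTERO'
--     elif estado == 5:
--         return 'REAL'
--     else:
--         return "Error: Expresión no válida"
-- ===== SOURCE B (Python) =====
-- def reconocer_token(entrada):
--     # Direct shape analysis of the whole string instead of simulating the DFA: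
--     # the language is  '++'<anything> -> INCR, '+' -> SUMA, digits+ -> ENTERO,
--     # digits+ '.' digit <anything> -> REAL; everything else is an error.
--     if entrada[:2] == '++':
--         return 'INCR'
--     if entrada == '+':
--         return 'SUMA'
--     k = 0
--     while k < len(entrada) and '0' <= entrada[k] <= '9':
--         k += 1
--     if k == 0:
--         return "Error: Expresión no válida" if entrada == "" else "Error: Símbolo no reconocido"
--     resto = entrada[k:]
--     if resto == "":
--         return 'ENTERO'
--     if resto[0] != '.':
--         return "Error: Símbolo no reconocido"
--     if len(resto) == 1:
--         return "Error: Expresión no válida"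
--     if '0' <= resto[1] <= '9':
--         return 'REAL'
--     return "Error: Símbolo no reconocido"
-- ===== Notes on version B (the rewrite author's own statement) =====
-- stated objective: alternative
-- what changed: Replaces the state-machine simulation with a direct shape analysis of the string: a check for the increment prefix and the bare plus sign, one digit-span scan, then case analysis on the remainder (empty means integer, a dot followed by a digit means real), with no DFA states at all.
import Mathlib
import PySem

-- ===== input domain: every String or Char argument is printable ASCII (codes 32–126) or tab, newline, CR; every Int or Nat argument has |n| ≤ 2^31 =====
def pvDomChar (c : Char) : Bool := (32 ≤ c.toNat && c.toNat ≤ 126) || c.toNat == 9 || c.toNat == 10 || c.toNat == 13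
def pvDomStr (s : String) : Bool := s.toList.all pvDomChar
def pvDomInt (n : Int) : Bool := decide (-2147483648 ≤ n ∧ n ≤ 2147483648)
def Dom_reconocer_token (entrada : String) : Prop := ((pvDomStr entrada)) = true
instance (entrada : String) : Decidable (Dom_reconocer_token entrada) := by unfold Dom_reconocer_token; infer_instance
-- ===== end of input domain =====

-- B replaces the DFA simulation by a direct shape analysis of the string (prefix checks, one digit-span scan, case analysis on the rest); same O(n) cost, equivalent result.

-- ===== PORT A =====
def es_digito (caracter : Char) : Bool := '0' ≤ caracter && caracter ≤ '9'

def pvLoopA (estado : Int) (cs : List Char) : String :=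
  match cs with
  | [] =>
    if estado = 1 then "SUMA"
    else if estado = 2 then "INCR"
    else if estado = 3 then "ENTERO"
    else if estado = 5 then "REAL"
    else "Error: Expresión no válida"
  | caracter :: rest =>
    if estado = 0 then
      if caracter = '+' then pvLoopA 1 rest
      else if es_digito caracter then pvLoopA 3 rest
      else "Error: Símbolo no reconocido"
    else if estado = 1 then
      if caracter = '+' then pvLoopA 2 rest
      else "Error: Símbolo no reconocido"
    else if estado = 3 then
      if es_digito caracter then pvLoopA 3 rest
      else if caracter = '.' then pvLoopA 4 rest
      else "Error: Símbolo no reconocido"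
    else if estado = 4 then
      if es_digito caracter then pvLoopA 5 rest
      else "Error: Símbolo no reconocido"
    else pvLoopA estado rest

def reconocer_token (entrada : String) : String := pvLoopA 0 entrada.toList

-- ===== PORT B =====
-- the digit-span while-loop of Source B: (number of leading digits, remaining chars)
def pvSpan (cs : List Char) : Nat × List Char :=
  match cs with
  | [] => (0, [])
  | c :: rest =>
    if ('0' ≤ c && c ≤ '9') then
      let p := pvSpan rest
      (p.1 + 1, p.2)
    else (0, c :: rest)

-- the if-chain of Source B after the digit span has been removed
def pvAfter (resto : List Char) : String :=
  match resto with
  | [] => "ENTERO"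
  | c :: rest2 =>
    if c ≠ '.' then "Error: Símbolo no reconocido"
    else match rest2 with
      | [] => "Error: Expresión no válida"
      | d :: _ => if ('0' ≤ d && d ≤ '9') then "REAL" else "Error: Símbolo no reconocido"

def pvAltCore (cs : List Char) : String :=
  if cs.take 2 = ['+', '+'] then "INCR"
  else if cs = ['+'] then "SUMA"
  else
    let p := pvSpan cs
    if p.1 = 0 then
      (if cs = [] then "Error: Expresión no válida" else "Error: Símbolo no reconocido")
    else pvAfter p.2

def reconocer_token_alt (entrada : String) : String := pvAltCore entrada.toList

-- ===== PRECONDITION & SPEC =====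
def Spec_reconocer_token (entrada : String) (out : String) : Prop := out = reconocer_token_alt entrada
instance (entrada : String) (out : String) : Decidable (Spec_reconocer_token entrada out) := by unfold Spec_reconocer_token; infer_instance

-- ===== CLAIM (what is proved, stated in full; the proofs are below) =====
def Claim_equal_reconocer_token : Prop := ∀ (entrada : String), Dom_reconocer_token entrada → Spec_reconocer_token entrada (reconocer_token entrada)

-- ===== LEMMAS AND PROOFS =====
theorem absorb2 : ∀ cs : List Char, pvLoopA 2 cs = "INCR" := by
  intro cs; induction cs with
  | nil => rfl
  | cons c rest ih => simp [pvLoopA, ih]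

theorem absorb5 : ∀ cs : List Char, pvLoopA 5 cs = "REAL" := by
  intro cs; induction cs with
  | nil => rfl
  | cons c rest ih => simp [pvLoopA, ih]

theorem state3 : ∀ cs : List Char, pvLoopA 3 cs = pvAfter (pvSpan cs).2 := by
  intro cs; induction cs with
  | nil => rfl
  | cons c rest ih =>
    by_cases hd : ('0' ≤ c && c ≤ '9') = true
    · simp [pvLoopA, pvSpan, es_digito, hd, ih]
    · by_cases hdot : c = '.'
      · subst hdot
        simp only [pvLoopA, pvSpan, es_digito, hd]
        match rest with
        | [] => simp [pvLoopA, pvAfter]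
        | d :: r2 =>
          by_cases hd2 : ('0' ≤ d && d ≤ '9') = true
          · simp [pvLoopA, es_digito, hd2, absorb5, pvAfter]
          · simp [pvLoopA, es_digito, hd2, pvAfter]
      · simp [pvLoopA, pvSpan, pvAfter, es_digito, hd, hdot]

theorem main_eq : ∀ cs : List Char, pvLoopA 0 cs = pvAltCore cs := by
  intro cs
  match cs with
  | [] => rfl
  | c :: rest =>
    by_cases hp : c = '+'
    · subst hp
      match rest with
      | [] => rfl
      | c2 :: r2 =>
        by_cases hp2 : c2 = '+'
        · subst hp2
          simp [pvLoopA, pvAltCore, absorb2]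
        · have hd : ('0' ≤ '+' && '+' ≤ '9') = false := by decide
          simp [pvLoopA, pvAltCore, pvSpan, List.take, es_digito, hp2, hd]
    · have htake : (c :: rest).take 2 ≠ ['+', '+'] := by
        cases rest <;> simp [List.take, hp]
      by_cases hd : ('0' ≤ c && c ≤ '9') = true
      · simp [pvLoopA, pvAltCore, pvSpan, es_digito, hd, hp, state3]
      · simp [pvLoopA, pvAltCore, pvSpan, es_digito, hd, hp]

-- ===== VERDICT (by name: the statement is the Claim_ definition above) =====
theorem reconocer_token_spec : Claim_equal_reconocer_token := by
  intro entrada _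
  unfold Spec_reconocer_token reconocer_token reconocer_token_alt
  exact main_eq entrada.toList
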